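-- pv_equiv track=rewrite | github.com/Jennie421/6.009 | q1_practice_a/quiz.py | trailing_weighted_average
-- ===== SOURCE A (Python) =====
-- def trailing_weighted_average(S, W):
--     A = []
--
--     m = len(S)
--     i = 0
--     while i < m:
--         average = 0
--         for k in range(len(W)):
--             if i-k <= 0:
--                 average += W[k] * S[0]
--             else:
--                 average += W[k] * S[i-k]
--         i+=1
--         A.append(average)
--
--     return A
-- ===== SOURCE B (Python) =====
-- def trailing_weighted_average(S, W):
--     # Loop-interchanged: accumulate each weight's whole shifted contribution
--     # into the output vector, instead of summing per output element.
--     if not S: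
--         return []
--     out = [0] * len(S)
--     for k, w in enumerate(W):
--         shifted = ([S[0]] * k + S)[:len(S)]
--         out = [o + w * x for o, x in zip(out, shifted)]
--     return out
-- ===== Notes on version B (the rewrite author's own statement) =====
-- stated objective: alternative
-- what changed: Interchanges the loops: instead of A's per-output-element inner sum over the weights with an index-clamp branch, B walks the weights once and accumulates each weight's whole shifted-series contribution into the output vector via zip, building the result by staged vector updates.
import Mathlib
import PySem

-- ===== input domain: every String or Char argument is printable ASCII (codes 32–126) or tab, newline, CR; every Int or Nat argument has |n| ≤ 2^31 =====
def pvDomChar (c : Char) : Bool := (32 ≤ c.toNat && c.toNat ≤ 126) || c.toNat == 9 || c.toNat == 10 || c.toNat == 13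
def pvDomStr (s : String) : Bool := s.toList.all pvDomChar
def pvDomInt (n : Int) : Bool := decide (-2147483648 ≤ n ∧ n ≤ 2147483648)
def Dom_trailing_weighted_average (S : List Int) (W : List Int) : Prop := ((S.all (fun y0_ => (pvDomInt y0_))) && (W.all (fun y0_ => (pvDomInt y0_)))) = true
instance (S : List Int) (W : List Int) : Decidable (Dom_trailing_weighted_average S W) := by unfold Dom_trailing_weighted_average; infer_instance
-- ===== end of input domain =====

-- B interchanges the loops: instead of A's per-output-element sum over the weights, it walks the
-- weights once and accumulates each weight's whole shifted contribution into the output vector.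

-- ===== PORT A =====
-- while i < m with A.append → foldl over pyRange 0 m 1 accumulating the output list;
-- inner for k in range(len(W)) with the boundary branch → foldl over pyRange 0 len(W) 1.
-- Indexing uses pyGetD (all indices are provably in range on every reached branch).
def trailing_weighted_average (S : List Int) (W : List Int) : List Int :=
  let m : Int := S.length
  (PySem.List.pyRange 0 m 1).foldl (fun A i =>
    let average : Int :=
      (PySem.List.pyRange 0 W.length 1).foldl (fun average k =>
        if i - k ≤ 0 then
          average + PySem.List.pyGetD W k 0 * PySem.List.pyGetD S 0 0
        else
          average + PySem.List.pyGetD W k 0 * PySem.List.pyGetD S (i - k) 0) 0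
    A ++ [average]) []

-- ===== PORT B =====
-- early return on empty S; out = [0]*len(S); for k,w in enumerate(W):
--   shifted = ([S[0]]*k + S)[:len(S)]; out = [o + w*x for o,x in zip(out, shifted)].
-- [S[0]]*k → List.replicate, the slice [:len(S)] → PySem.List.slice, zip comprehension → zipWith.
def trailing_weighted_average_alt (S : List Int) (W : List Int) : List Int :=
  match S with
  | [] => []
  | s0 :: _ =>
    (PySem.List.enumerate W 0).foldl (fun out p =>
      let shifted := PySem.List.slice (List.replicate p.1.toNat s0 ++ S) none (some (S.length : Int))
      List.zipWith (fun o x => o + p.2 * x) out shifted)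
      (List.replicate S.length 0)

-- ===== PRECONDITION & SPEC =====
def Spec_trailing_weighted_average (S : List Int) (W : List Int) (out : List Int) : Prop := out = trailing_weighted_average_alt S W
instance (S : List Int) (W : List Int) (out : List Int) : Decidable (Spec_trailing_weighted_average S W out) := by unfold Spec_trailing_weighted_average; infer_instance

-- ===== CLAIM (what is proved, stated in full; the proofs are below) =====
def Claim_equal_trailing_weighted_average : Prop := ∀ (S : List Int) (W : List Int), Dom_trailing_weighted_average S W → Spec_trailing_weighted_average S W (trailing_weighted_average S W)

-- ===== LEMMAS AND PROOFS =====

-- The shifted window element B reads is the clamped series element A reads.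
lemma shifted_getD (s0 : Int) (t : List Int) (k i : Nat) (hi : i < (s0 :: t).length) :
    ((List.replicate k s0 ++ (s0 :: t)).take (s0 :: t).length).getD i 0
    = if (i : Int) - (k : Int) ≤ 0 then s0
      else PySem.List.pyGetD (s0 :: t) ((i : Int) - (k : Int)) 0 := by
  have hn : i < ((List.replicate k s0 ++ (s0 :: t)).take (s0 :: t).length).length := by
    simp only [List.length_take, List.length_append, List.length_replicate, List.length_cons]
    simp only [List.length_cons] at hi
    exact lt_min hi (by omega)
  rw [List.getD_eq_getElem _ _ hn, List.getElem_take]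
  by_cases h : (i : Int) - (k : Int) ≤ 0
  · simp only [if_pos h]
    have hik : i ≤ k := by omega
    by_cases hlt : i < k
    · rw [List.getElem_append_left (by simpa using hlt)]
      exact List.getElem_replicate ..
    · have hik' : i = k := by omega
      rw [List.getElem_append_right (by simp [hik'])]
      simp [hik']
  · simp only [if_neg h]
    have hk : k < i := by omega
    have h0 : (0 : Int) ≤ (i : Int) - (k : Int) := by omega
    have hlt : (i : Int) - (k : Int) < ((s0 :: t).length : Int) := by
      simp only [List.length_cons] at hi ⊢; push_cast; omega
    rw [PySem.List.pyGetD_eq_getElem _ _ h0 hlt]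
    rw [List.getElem_append_right (by simp; omega)]
    congr 1
    simp only [List.length_replicate]
    omega

-- Loop interchange: folding per-weight vector updates equals, elementwise, the per-element fold.
lemma fold_zipWith_getD {n : Nat} (w : Nat → Int) (g : Nat → List Int)
    (hg : ∀ k, (g k).length = n) :
    ∀ (L : List Nat) (out : List Int), out.length = n →
      (L.foldl (fun o k => List.zipWith (fun a b => a + w k * b) o (g k)) out).length = n ∧
      ∀ i, i < n →
        (L.foldl (fun o k => List.zipWith (fun a b => a + w k * b) o (g k)) out).getD i 0
        = L.foldl (fun a k => a + w k * (g k).getD i 0) (out.getD i 0) := by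
  intro L
  induction L with
  | nil => intro out hout; exact ⟨hout, fun i _ => rfl⟩
  | cons k L ih =>
    intro out hout
    have hlen : (List.zipWith (fun a b => a + w k * b) out (g k)).length = n := by
      simp [hout, hg k]
    obtain ⟨h1, h2⟩ := ih _ hlen
    refine ⟨h1, fun i hi => ?_⟩
    have hzw : (List.zipWith (fun a b => a + w k * b) out (g k)).getD i 0
        = out.getD i 0 + w k * (g k).getD i 0 := by
      rw [List.getD_eq_getElem _ _ (by omega : i < (List.zipWith (fun a b => a + w k * b) out (g k)).length),
          List.getElem_zipWith,
          List.getD_eq_getElem _ _ (by omega : i < out.length),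
          List.getD_eq_getElem _ _ (by rw [hg k]; omega : i < (g k).length)]
    simp only [List.foldl_cons, h2 i hi, hzw]

theorem trailing_weighted_average_spec : Claim_equal_trailing_weighted_average := by
  intro S W _
  unfold Spec_trailing_weighted_average trailing_weighted_average trailing_weighted_average_alt
  cases S with
  | nil => simp [PySem.List.pyRange_one_eq_nil]
  | cons s0 t =>
    simp only
    set n := (s0 :: t).length with hn
    -- A as a map over output indices
    rw [PySem.List.foldl_append_singleton_eq_map, PySem.List.pyRange_zero_nat n, List.map_map,
        PySem.List.pyRange_zero_nat W.length]
    -- B: enumerate → range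
    rw [PySem.List.enumerate_eq_map_pyRange W 0]
    simp only [PySem.List.len_eq]
    rw [PySem.List.pyRange_zero_nat W.length, List.map_map, List.foldl_map]
    simp only [Function.comp, List.nil_append]
    -- loop interchange on B's fold
    obtain ⟨hlen, hget⟩ := fold_zipWith_getD (n := n)
        (fun k : Nat => PySem.List.pyGetD W ((k : Nat) : Int) 0)
        (fun k : Nat => PySem.List.slice
          (List.replicate (Int.toNat ((k : Nat) : Int)) s0 ++ (s0 :: t)) none (some ((n : Nat) : Int)))
        (by intro k
            simp only [Int.toNat_natCast, PySem.List.slice_to_natCast, List.length_take,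
                List.length_append, List.length_replicate, hn, List.length_cons]
            omega)
        (List.range W.length) (List.replicate n 0) (by simp)
    -- elementwise comparison
    refine List.ext_getElem ?_ ?_
    · simpa using hlen.symm
    intro i hiA hiB
    have hin : i < n := by simpa using hiA
    rw [List.getElem_map]
    conv_rhs => rw [List.getElem_eq_getD (fallback := 0)]
    rw [hget i hin]
    have hrep : (List.replicate n (0 : Int)).getD i 0 = 0 := by
      rw [List.getD_eq_getElem _ _ (by simpa using hin)]; exact List.getElem_replicate ..
    rw [hrep]
    simp only [List.getElem_range, Int.toNat_natCast, PySem.List.slice_to_natCast,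
        Function.comp_apply]
    rw [List.foldl_map, hn]
    have hin2 : i < (s0 :: t).length := hn ▸ hin
    -- both sides: fold over range W.length of the same terms
    refine PySem.List.foldl_congr_mem _ _ _ _ ?_
    intro acc k _
    rw [shifted_getD s0 t k i hin2]
    by_cases h : (i : Int) - (k : Int) ≤ 0
    · simp [h, PySem.List.pyGetD_zero_cons]
    · simp [h]
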